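-- pv_equiv track=rewrite | github.com/IshikaIme/CSE-406--Security-Sessional | offline 1 -AES/My submission/AES_1805092.py | convert_to_col_order_array_from_list
-- ===== SOURCE A (Python) =====
-- def convert_to_col_order_array_from_list(hexArray):
--     mat = []
--     length = len(hexArray)
--     for j in range(4):
--         row = []
--         for i in range(j, length, 4):
--             row.append(hexArray[i])
--         mat.append(row)
--     return mat
-- ===== SOURCE B (Python) =====
-- def convert_to_col_order_array_from_list(hexArray):
--     mat = [[], [], [], []]
--     for i, x in enumerate(hexArray):
--         mat[i % 4].append(x)
--     return mat
-- ===== Notes on version B (the rewrite author's own statement) =====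
-- stated objective: alternative
-- what changed: Replaces A's four strided index-loop passes (range(j, len, 4) with repeated indexing) by a single enumerate pass that scatters each element into the bucket i % 4.
import Mathlib
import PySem

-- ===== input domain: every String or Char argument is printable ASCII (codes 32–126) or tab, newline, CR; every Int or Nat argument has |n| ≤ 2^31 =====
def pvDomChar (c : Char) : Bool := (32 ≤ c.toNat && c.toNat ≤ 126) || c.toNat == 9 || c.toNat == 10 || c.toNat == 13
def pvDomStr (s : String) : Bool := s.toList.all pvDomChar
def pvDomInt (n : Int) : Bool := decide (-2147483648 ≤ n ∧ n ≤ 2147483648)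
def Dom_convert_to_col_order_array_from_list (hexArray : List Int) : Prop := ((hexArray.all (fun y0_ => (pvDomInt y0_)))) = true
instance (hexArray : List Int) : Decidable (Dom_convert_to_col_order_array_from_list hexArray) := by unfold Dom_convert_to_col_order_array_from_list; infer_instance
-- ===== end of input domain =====

-- B replaces A's four strided index loops by one enumerate pass scattering elements into bucket i % 4 (alternative decomposition, same cost).

-- ===== PORT A =====
def convert_to_col_order_array_from_list (hexArray : List Int) : List (List Int) :=
  let length : Int := PySem.List.len hexArray
  (PySem.List.pyRange 0 4 1).foldl
    (fun mat j =>
      let row := (PySem.List.pyRange j length 4).foldl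
        (fun row i => row ++ [PySem.List.pyGetD hexArray i 0]) []
      mat ++ [row]) []

-- ===== PORT B =====
-- 'mat[i % 4].append(x)' on the 4-row mat is ported as updating the (i % 4)-th component of a 4-tuple of rows.
def convert_to_col_order_array_from_list_alt (hexArray : List Int) : List (List Int) :=
  let s := (PySem.List.enumerate hexArray).foldl
    (fun (s : List Int × List Int × List Int × List Int) p =>
      if PySem.Int.mod p.1 4 == 0 then (s.1 ++ [p.2], s.2.1, s.2.2.1, s.2.2.2)
      else if PySem.Int.mod p.1 4 == 1 then (s.1, s.2.1 ++ [p.2], s.2.2.1, s.2.2.2)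
      else if PySem.Int.mod p.1 4 == 2 then (s.1, s.2.1, s.2.2.1 ++ [p.2], s.2.2.2)
      else (s.1, s.2.1, s.2.2.1, s.2.2.2 ++ [p.2]))
    ([], [], [], [])
  [s.1, s.2.1, s.2.2.1, s.2.2.2]

-- ===== PRECONDITION & SPEC =====
def Spec_convert_to_col_order_array_from_list (hexArray : List Int) (out : List (List Int)) : Prop := out = convert_to_col_order_array_from_list_alt hexArray
instance (hexArray : List Int) (out : List (List Int)) : Decidable (Spec_convert_to_col_order_array_from_list hexArray out) := by unfold Spec_convert_to_col_order_array_from_list; infer_instance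

-- ===== CLAIM (what is proved, stated in full; the proofs are below) =====
def Claim_equal_convert_to_col_order_array_from_list : Prop := ∀ (hexArray : List Int), Dom_convert_to_col_order_array_from_list hexArray → Spec_convert_to_col_order_array_from_list hexArray (convert_to_col_order_array_from_list hexArray)

-- ===== LEMMAS AND PROOFS =====

theorem pv_mod_eq_emod (x : Int) : PySem.Int.mod x 4 = x % 4 := by
  show x.fmod 4 = x % 4
  rw [Int.fmod_eq_emod]
  simp

-- the strided range is the filter of the full range by residue
theorem pv_stride_eq_filter (j n : Int) (hj0 : 0 ≤ j) (hj4 : j < 4) :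
    PySem.List.pyRange j n 4 =
      (PySem.List.pyRange 0 n 1).filter (fun i => PySem.Int.mod i 4 == j) := by
  have hpl : (PySem.List.pyRange j n 4).Pairwise (· < ·) := by
    rw [PySem.List.pyRange_of_pos _ _ (by norm_num : (0:Int) < 4)]
    rw [List.pairwise_map]
    exact (List.pairwise_lt_range).imp (by intro a b h; omega)
  have hpr : ((PySem.List.pyRange 0 n 1).filter (fun i => PySem.Int.mod i 4 == j)).Pairwise (· < ·) :=
    List.Pairwise.sublist List.filter_sublist (PySem.List.pairwise_lt_pyRange_one 0 n)
  have hmem : ∀ x, x ∈ PySem.List.pyRange j n 4 ↔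
      x ∈ (PySem.List.pyRange 0 n 1).filter (fun i => PySem.Int.mod i 4 == j) := by
    intro x
    rw [PySem.List.mem_pyRange_iff_of_pos (by norm_num : (0:Int) < 4) x]
    rw [List.mem_filter, PySem.List.mem_pyRange_one]
    simp only [pv_mod_eq_emod, beq_iff_eq]
    omega
  have hperm : (PySem.List.pyRange j n 4).Perm
      ((PySem.List.pyRange 0 n 1).filter (fun i => PySem.Int.mod i 4 == j)) :=
    (List.perm_ext_iff_of_nodup (hpl.imp ne_of_lt) (hpr.imp ne_of_lt)).mpr hmem
  exact List.Perm.eq_of_pairwise (fun a b _ _ h h' => le_antisymm h h')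
    (hpl.imp le_of_lt) (hpr.imp le_of_lt) hperm

-- one row of A = one bucket of B
theorem pv_row_eq (xs : List Int) (j : Int) (hj0 : 0 ≤ j) (hj4 : j < 4) :
    (PySem.List.pyRange j (PySem.List.len xs) 4).map (fun i => PySem.List.pyGetD xs i 0) =
      ((PySem.List.enumerate xs).filter (fun p => PySem.Int.mod p.1 4 == j)).map (·.2) := by
  rw [PySem.List.enumerate_eq_map_pyRange xs 0]
  rw [List.filter_map, List.map_map]
  rw [pv_stride_eq_filter j (PySem.List.len xs) hj0 hj4]
  rfl

-- the scatter fold appends each element to the bucket of its index residue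
theorem pv_foldB (l : List (Int × Int)) (a b c d : List Int) :
    l.foldl (fun (s : List Int × List Int × List Int × List Int) p =>
      if PySem.Int.mod p.1 4 == 0 then (s.1 ++ [p.2], s.2.1, s.2.2.1, s.2.2.2)
      else if PySem.Int.mod p.1 4 == 1 then (s.1, s.2.1 ++ [p.2], s.2.2.1, s.2.2.2)
      else if PySem.Int.mod p.1 4 == 2 then (s.1, s.2.1, s.2.2.1 ++ [p.2], s.2.2.2)
      else (s.1, s.2.1, s.2.2.1, s.2.2.2 ++ [p.2])) (a, b, c, d)
    = (a ++ (l.filter (fun p => PySem.Int.mod p.1 4 == 0)).map (·.2),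
       b ++ (l.filter (fun p => PySem.Int.mod p.1 4 == 1)).map (·.2),
       c ++ (l.filter (fun p => PySem.Int.mod p.1 4 == 2)).map (·.2),
       d ++ (l.filter (fun p => PySem.Int.mod p.1 4 == 3)).map (·.2)) := by
  induction l generalizing a b c d with
  | nil => simp
  | cons p t ih =>
    have hm : p.1 % 4 = 0 ∨ p.1 % 4 = 1 ∨ p.1 % 4 = 2 ∨ p.1 % 4 = 3 := by omega
    rcases hm with h | h | h | h
    · have hk : PySem.Int.mod p.1 4 = 0 := by rw [pv_mod_eq_emod]; omega
      simp only [List.foldl_cons, List.filter_cons, hk, Int.reduceBEq, ih,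
        Bool.false_eq_true, if_false, if_true, List.map_cons, List.append_assoc,
        List.singleton_append]
    · have hk : PySem.Int.mod p.1 4 = 1 := by rw [pv_mod_eq_emod]; omega
      simp only [List.foldl_cons, List.filter_cons, hk, Int.reduceBEq, ih,
        Bool.false_eq_true, if_false, if_true, List.map_cons, List.append_assoc,
        List.singleton_append]
    · have hk : PySem.Int.mod p.1 4 = 2 := by rw [pv_mod_eq_emod]; omega
      simp only [List.foldl_cons, List.filter_cons, hk, Int.reduceBEq, ih,
        Bool.false_eq_true, if_false, if_true, List.map_cons, List.append_assoc,
        List.singleton_append]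
    · have hk : PySem.Int.mod p.1 4 = 3 := by rw [pv_mod_eq_emod]; omega
      simp only [List.foldl_cons, List.filter_cons, hk, Int.reduceBEq, ih,
        Bool.false_eq_true, if_false, if_true, List.map_cons, List.append_assoc,
        List.singleton_append]

-- ===== VERDICT (by name: the statement is the Claim_ definition above) =====
theorem convert_to_col_order_array_from_list_spec : Claim_equal_convert_to_col_order_array_from_list := by
  intro xs _
  show convert_to_col_order_array_from_list xs = convert_to_col_order_array_from_list_alt xs
  -- A side: unfold the outer loop over [0,1,2,3] and each inner append loop
  unfold convert_to_col_order_array_from_list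
  have h4 : PySem.List.pyRange 0 4 1 = [0, 1, 2, 3] := by decide
  rw [h4]
  simp only [List.foldl, PySem.List.foldl_append_singleton_eq_map, List.nil_append]
  -- B side: characterise the 4-tuple scatter fold and match row by row
  unfold convert_to_col_order_array_from_list_alt
  rw [pv_foldB (PySem.List.enumerate xs) [] [] [] []]
  simp only [List.nil_append]
  rw [pv_row_eq xs 0 (by norm_num) (by norm_num),
    pv_row_eq xs 1 (by norm_num) (by norm_num),
    pv_row_eq xs 2 (by norm_num) (by norm_num),
    pv_row_eq xs 3 (by norm_num) (by norm_num)]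
  rfl
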